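-- pv_equiv track=rewrite | github.com/daryll-ko/advent-of-code-2024 | 17b.py | val_to_bits
-- ===== SOURCE A (Python) =====
-- def val_to_bits(val: int, size: int = 3) -> list[int]:
--     b = []
--
--     while val > 0:
--         b.append(val % 2)
--         val //= 2
--
--     while len(b) < size:
--         b.append(0)
--
--     return b
-- ===== SOURCE B (Python) =====
-- def val_to_bits(val: int, size: int = 3) -> list[int]:
--     if val <= 0:
--         return [0] * max(size, 0)
--     return [val % 2] + val_to_bits(val // 2, size - 1)
-- ===== Notes on version B (the rewrite author's own statement) =====
-- stated objective: simpler
-- what changed: Replaces A's two staged while-loops (bit extraction, then a separate zero-padding loop) with a single structural recursion in which the remaining size is carried down and the padding falls out of the base case as a replicate.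
import Mathlib
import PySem

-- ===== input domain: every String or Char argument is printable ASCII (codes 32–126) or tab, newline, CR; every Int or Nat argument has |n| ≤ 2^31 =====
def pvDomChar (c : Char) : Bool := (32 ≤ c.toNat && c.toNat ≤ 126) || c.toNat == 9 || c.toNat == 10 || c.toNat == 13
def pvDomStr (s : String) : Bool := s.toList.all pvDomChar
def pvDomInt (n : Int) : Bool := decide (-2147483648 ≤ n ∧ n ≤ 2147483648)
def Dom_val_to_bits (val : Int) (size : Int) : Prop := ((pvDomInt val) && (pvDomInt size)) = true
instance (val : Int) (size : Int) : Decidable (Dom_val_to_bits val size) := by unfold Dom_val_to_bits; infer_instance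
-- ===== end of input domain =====

-- B is a single structural recursion carrying the remaining size down (padding becomes the
-- base case's replicate), replacing A's two staged while-loops; objective: simpler.

-- ===== PORT A =====
-- first while-loop of A: extract bits of val by repeated % 2 and //= 2 while val > 0
def valToBitsLoop (val : Int) : List Int :=
  if _h : val > 0 then
    PySem.Int.mod val 2 :: valToBitsLoop (PySem.Int.floordiv val 2)
  else []
termination_by val.toNat
decreasing_by
  rw [PySem.Int.floordiv_eq_ediv_of_pos (by omega : (0:Int) < 2)]
  omega

-- second while-loop of A: append 0 while len(b) < size
def padLoop (b : List Int) (size : Int) : List Int :=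
  if (b.length : Int) < size then padLoop (b ++ [0]) size else b
termination_by (size - b.length).toNat
decreasing_by simp; omega

def val_to_bits (val : Int) (size : Int) : List Int :=
  padLoop (valToBitsLoop val) size

-- ===== PORT B =====
def val_to_bits_alt (val : Int) (size : Int) : List Int :=
  if _h : val ≤ 0 then
    List.replicate (max size 0).toNat 0          -- [0] * max(size, 0)
  else
    PySem.Int.mod val 2 :: val_to_bits_alt (PySem.Int.floordiv val 2) (size - 1)
termination_by val.toNat
decreasing_by
  rw [PySem.Int.floordiv_eq_ediv_of_pos (by omega : (0:Int) < 2)]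
  omega

-- ===== PRECONDITION & SPEC =====
def Spec_val_to_bits (val : Int) (size : Int) (out : List Int) : Prop := out = val_to_bits_alt val size
instance (val : Int) (size : Int) (out : List Int) : Decidable (Spec_val_to_bits val size out) := by unfold Spec_val_to_bits; infer_instance

-- ===== CLAIM (what is proved, stated in full; the proofs are below) =====
def Claim_equal_val_to_bits : Prop := ∀ (val : Int) (size : Int), Dom_val_to_bits val size → Spec_val_to_bits val size (val_to_bits val size)

-- ===== LEMMAS AND PROOFS =====

lemma padLoop_eq (b : List Int) (size : Int) :
    padLoop b size = b ++ List.replicate (size - b.length).toNat 0 := by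
  rw [padLoop]
  by_cases h : (b.length : Int) < size
  · rw [if_pos h, padLoop_eq (b ++ [0]) size]
    have h1 : (size - (b ++ [0]).length).toNat = (size - b.length).toNat - 1 := by
      simp; omega
    have h2 : (size - b.length).toNat = ((size - b.length).toNat - 1) + 1 := by omega
    rw [h1, List.append_assoc, h2]
    simp [List.replicate_succ]
  · rw [if_neg h]
    have : (size - b.length).toNat = 0 := by omega
    simp [this]
termination_by (size - b.length).toNat
decreasing_by simp; omega

lemma alt_eq_loop_pad (val size : Int) :
    val_to_bits_alt val size = valToBitsLoop val ++ List.replicate (size - (valToBitsLoop val).length).toNat 0 := by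
  by_cases h : val ≤ 0
  · rw [val_to_bits_alt, dif_pos h, valToBitsLoop, dif_neg (by omega)]
    simp
    rw [show (max size 0).toNat = size.toNat from by omega]
  · rw [val_to_bits_alt, dif_neg h, valToBitsLoop, dif_pos (by omega)]
    have hfd : PySem.Int.floordiv val 2 = val / 2 :=
      PySem.Int.floordiv_eq_ediv_of_pos (by omega)
    rw [hfd, alt_eq_loop_pad (val / 2) (size - 1)]
    simp [List.length_cons]
    omega
termination_by val.toNat
decreasing_by omega

-- ===== VERDICT (by name: the statement is the Claim_ definition above) =====
theorem val_to_bits_spec : Claim_equal_val_to_bits := by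
  intro val size _
  unfold Spec_val_to_bits val_to_bits
  rw [padLoop_eq, alt_eq_loop_pad]
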